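-- pv_equiv track=rewrite | github.com/AnanthKumarVasamsetti/Anveshana | tf_idf_calculation.py | reorder_keywords
-- ===== SOURCE A (Python) =====
-- def reorder_keywords(keywords_map):
--     reorder_map = {}
--
--     for sol_id in keywords_map:
--         for w in keywords_map[sol_id]:
--             if w in list(reorder_map.keys()):
--                 reorder_map[w][sol_id] = keywords_map[sol_id][w]
--             else:
--                 reorder_map[w] = {}
--                 reorder_map[w][sol_id] = keywords_map[sol_id][w]
--
--     return reorder_map
-- ===== SOURCE B (Python) =====
-- def reorder_keywords(keywords_map):
--     # Phase 1: gather the universe of keywords in first-appearance order.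
--     words = []
--     seen = set()
--     for sol_id in keywords_map:
--         for w in keywords_map[sol_id]:
--             if w not in seen:
--                 seen.add(w)
--                 words.append(w)
--     # Phase 2: inverted nesting — for each word, scan every solution.
--     return {w: {sol_id: keywords_map[sol_id][w]
--                 for sol_id in keywords_map if w in keywords_map[sol_id]}
--             for w in words}
-- ===== Notes on version B (the rewrite author's own statement) =====
-- stated objective: alternative
-- what changed: A does one scatter pass over (solution, word) pairs, growing nested dicts with a linear 'w in list(keys)' test; B first gathers the universe of keywords with a seen-set pass and then builds the transpose with the nesting inverted (for each word, scan every solution), so the per-word membership test is O(1) and no incremental dict patching happens.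
import Mathlib
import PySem

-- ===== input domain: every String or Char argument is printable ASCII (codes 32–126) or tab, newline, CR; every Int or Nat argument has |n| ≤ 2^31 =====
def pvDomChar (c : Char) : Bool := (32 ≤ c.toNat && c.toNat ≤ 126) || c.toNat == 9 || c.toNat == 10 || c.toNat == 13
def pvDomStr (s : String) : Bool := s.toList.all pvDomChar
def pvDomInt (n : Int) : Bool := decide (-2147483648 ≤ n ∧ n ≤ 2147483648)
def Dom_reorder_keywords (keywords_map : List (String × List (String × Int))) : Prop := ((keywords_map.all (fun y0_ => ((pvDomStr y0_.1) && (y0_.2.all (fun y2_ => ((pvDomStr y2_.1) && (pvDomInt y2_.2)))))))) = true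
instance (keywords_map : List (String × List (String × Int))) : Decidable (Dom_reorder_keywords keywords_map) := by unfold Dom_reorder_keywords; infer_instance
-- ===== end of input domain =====

-- B replaces A's single scatter pass (patching nested dicts per (solution, word) pair) by a
-- gather-all-keywords phase followed by an inverted nested scan (per word, over all solutions);
-- objective: alternative decomposition, same result, proved equal on duplicate-key-free inputs.


-- ===== PORT A =====
def reorder_keywords (keywords_map : List (String × List (String × Int))) : List (String × List (String × Int)) :=
  let kmd : PySem.Dict String (PySem.Dict String Int) :=
    PySem.Dict.mk (keywords_map.map (fun p => (p.1, PySem.Dict.mk p.2)))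
  let rm : PySem.Dict String (PySem.Dict String Int) :=
    kmd.keys.foldl (fun rm sol_id =>
      (kmd.getD sol_id (PySem.Dict.mk [])).keys.foldl (fun rm w =>
        if rm.keys.contains w then
          rm.modify w (PySem.Dict.mk [])
            (fun d => d.insert sol_id ((kmd.getD sol_id (PySem.Dict.mk [])).getD w 0))
        else
          (rm.insert w (PySem.Dict.mk [])).modify w (PySem.Dict.mk [])
            (fun d => d.insert sol_id ((kmd.getD sol_id (PySem.Dict.mk [])).getD w 0)))
        rm)
      (PySem.Dict.mk [])
  rm.items.map (fun p => (p.1, p.2.items))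

-- ===== PORT B =====
def reorder_keywords_alt (keywords_map : List (String × List (String × Int))) : List (String × List (String × Int)) :=
  let kmd : PySem.Dict String (PySem.Dict String Int) :=
    PySem.Dict.mk (keywords_map.map (fun p => (p.1, PySem.Dict.mk p.2)))
  -- phase 1: gather the universe of keywords (seen set + first-appearance list)
  let sw : PySem.Set String × List String :=
    kmd.keys.foldl (fun sw sol_id =>
      (kmd.getD sol_id (PySem.Dict.mk [])).keys.foldl (fun sw w =>
        if PySem.Set.contains sw.1 w then sw
        else (PySem.Set.add sw.1 w, sw.2 ++ [w])) sw)
      (PySem.Set.empty, [])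
  -- phase 2: inverted nesting — per word, scan every solution
  let res : PySem.Dict String (PySem.Dict String Int) :=
    sw.2.foldl (fun d w =>
      d.insert w
        (kmd.keys.foldl (fun r sol_id =>
          if (kmd.getD sol_id (PySem.Dict.mk [])).contains w then
            r.insert sol_id ((kmd.getD sol_id (PySem.Dict.mk [])).getD w 0)
          else r) (PySem.Dict.mk []))) (PySem.Dict.mk [])
  res.items.map (fun p => (p.1, p.2.items))

-- ===== PRECONDITION & SPEC =====
-- Pre_ excludes association lists with a duplicated outer or inner key: those do not represent a
-- Python dict (the Python A only ever receives genuine dicts, whose keys are unique).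
def Pre_reorder_keywords (keywords_map : List (String × List (String × Int))) : Prop :=
  (keywords_map.map Prod.fst).Nodup ∧ ∀ p ∈ keywords_map, (p.2.map Prod.fst).Nodup
instance (keywords_map : List (String × List (String × Int))) : Decidable (Pre_reorder_keywords keywords_map) := by unfold Pre_reorder_keywords; infer_instance
def pvWitness_reorder_keywords : (List (String × List (String × Int))) :=
  [("s1", [("a", 1), ("b", 2)]), ("s2", [("a", 3)])]
def Spec_reorder_keywords (keywords_map : List (String × List (String × Int))) (out : List (String × List (String × Int))) : Prop := out = reorder_keywords_alt keywords_map
instance (keywords_map : List (String × List (String × Int))) (out : List (String × List (String × Int))) : Decidable (Spec_reorder_keywords keywords_map out) := by unfold Spec_reorder_keywords; infer_instance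

-- ===== CLAIM (what is proved, stated in full; the proofs are below) =====
def Claim_equal_reorder_keywords : Prop := ∀ (keywords_map : List (String × List (String × Int))), Dom_reorder_keywords keywords_map → Pre_reorder_keywords keywords_map → Spec_reorder_keywords keywords_map (reorder_keywords keywords_map)

-- ===== LEMMAS AND PROOFS =====

-- all keywords, in scan order (with repetitions)
def pvAllW (L : List (String × List (String × Int))) : List String :=
  L.flatMap (fun p => p.2.map Prod.fst)

-- the transposed row of word w: the solutions containing w, with w's value there
def pvRowF (L : List (String × List (String × Int))) (w : String) : List (String × Int) :=
  L.filterMap (fun p => (p.2.find? (fun q => q.1 == w)).map (fun q => (p.1, q.2)))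

lemma pvRowF_keys_subset {L : List (String × List (String × Int))} {w k : String}
    (h : k ∈ (pvRowF L w).map Prod.fst) : k ∈ L.map Prod.fst := by
  simp only [pvRowF, List.mem_map, List.mem_filterMap, Option.map_eq_some_iff] at h ⊢
  obtain ⟨e, ⟨p, hp, q, hq, he⟩, hk⟩ := h
  exact ⟨p, hp, by rw [← he] at hk; exact hk⟩

lemma pvRowF_nil_of_not_mem {L : List (String × List (String × Int))} {w : String}
    (h : w ∉ pvAllW L) : pvRowF L w = [] := by
  simp only [pvAllW, List.mem_flatMap, List.mem_map, not_exists] at h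
  simp only [pvRowF, List.filterMap_eq_nil_iff]
  intro p hp
  rw [Option.map_eq_none_iff, List.find?_eq_none]
  intro q hq hbq
  exact (h p) ⟨hp, ⟨q, hq, by simpa using hbq⟩⟩

-- iterating a dict built from an assoc list with Nodup keys is iterating the list
lemma foldl_keys_getD {σ : Type} (km : List (String × List (String × Int)))
    (hk : (km.map Prod.fst).Nodup)
    (f : σ → String → PySem.Dict String Int → σ) (init : σ) :
    (PySem.Dict.mk (km.map (fun p => (p.1, PySem.Dict.mk p.2)))).keys.foldl
      (fun st sol => f st sol
        ((PySem.Dict.mk (km.map (fun p => (p.1, PySem.Dict.mk p.2)))).getD sol (PySem.Dict.mk []))) init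
    = km.foldl (fun st p => f st p.1 (PySem.Dict.mk p.2)) init := by
  have hkeys : (PySem.Dict.mk (km.map (fun p => (p.1, PySem.Dict.mk p.2)))).keys
      = km.map Prod.fst := by
    simp [PySem.Dict.keys, List.map_map, Function.comp_def]
  rw [hkeys, List.foldl_map]
  apply PySem.List.foldl_congr_mem
  intro st p hp
  congr 1
  apply PySem.Dict.getD_of_mem_items
  · exact List.mem_map.mpr ⟨p, hp, rfl⟩
  · rw [hkeys]; exact hk

lemma foldl_inner_keys {σ : Type} (I : List (String × Int)) (hI : (I.map Prod.fst).Nodup)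
    (f : σ → String → Int → σ) (init : σ) :
    (PySem.Dict.mk I).keys.foldl (fun st w => f st w ((PySem.Dict.mk I).getD w 0)) init
    = I.foldl (fun st q => f st q.1 q.2) init := by
  have hkeys : (PySem.Dict.mk I).keys = I.map Prod.fst := by
    simp [PySem.Dict.keys]
  rw [hkeys, List.foldl_map]
  apply PySem.List.foldl_congr_mem
  intro st q hq
  congr 1
  exact PySem.Dict.getD_of_mem_items _ hq (by rw [hkeys]; exact hI) 0

lemma stepA_collapse (rm : PySem.Dict String (PySem.Dict String Int)) (w s : String) (v : Int) :
    (if rm.keys.contains w then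
       rm.modify w (PySem.Dict.mk []) (fun d => d.insert s v)
     else
       (rm.insert w (PySem.Dict.mk [])).modify w (PySem.Dict.mk []) (fun d => d.insert s v))
    = rm.modify w (PySem.Dict.mk []) (fun d => d.insert s v) := by
  split_ifs with h
  · rfl
  · have hc : rm.contains w = false := by
      rw [Bool.eq_false_iff]
      intro hcon
      rw [PySem.Dict.contains_iff_mem_keys] at hcon
      simp at h
      exact h hcon
    simp only [PySem.Dict.modify]
    rw [PySem.Dict.getD_insert_self, PySem.Dict.insert_insert_self,
      PySem.Dict.getD_of_not_contains _ _ hc]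

-- inserting into / reading from the graph-dict of a key list
lemma insert_graph_mem (W : List String) (g : String → PySem.Dict String Int) (k : String)
    (hk : k ∈ W) (v : PySem.Dict String Int) :
    (PySem.Dict.mk (W.map (fun w => (w, g w)))).insert k v
    = PySem.Dict.mk (W.map (fun w => (w, if w = k then v else g w))) := by
  have hc : (PySem.Dict.mk (W.map (fun w => (w, g w)))).contains k = true := by
    simp [PySem.Dict.contains]; exact hk
  simp only [PySem.Dict.insert, hc, if_true, List.map_map]
  congr 1
  apply List.map_congr_left
  intro w hw
  by_cases hwk : w = k <;> simp [hwk, Function.comp]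

lemma insert_graph_not_mem (W : List String) (g : String → PySem.Dict String Int) (k : String)
    (hk : k ∉ W) (v : PySem.Dict String Int) :
    (PySem.Dict.mk (W.map (fun w => (w, g w)))).insert k v
    = PySem.Dict.mk ((W ++ [k]).map (fun w => (w, if w = k then v else g w))) := by
  have hc : (PySem.Dict.mk (W.map (fun w => (w, g w)))).contains k = false := by
    simp [PySem.Dict.contains]
    exact fun x hx hxk => hk (hxk ▸ hx)
  simp only [PySem.Dict.insert, hc, Bool.false_eq_true, if_false, List.map_append,
    List.map_cons, List.map_nil, if_true]
  congr 1
  rw [List.append_left_inj]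
  apply List.map_congr_left
  intro w hw
  have : w ≠ k := fun h => hk (h ▸ hw)
  simp [this]

lemma getD_graph_mem (W : List String) (g : String → PySem.Dict String Int) (k : String)
    (hW : W.Nodup) (hk : k ∈ W) :
    (PySem.Dict.mk (W.map (fun w => (w, g w)))).getD k (PySem.Dict.mk []) = g k := by
  apply PySem.Dict.getD_of_mem_items
  · exact List.mem_map.mpr ⟨k, hk, rfl⟩
  · simpa [PySem.Dict.keys, List.map_map, Function.comp_def] using hW

lemma getD_graph_not_mem (W : List String) (g : String → PySem.Dict String Int) (k : String)
    (hk : k ∉ W) :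
    (PySem.Dict.mk (W.map (fun w => (w, g w)))).getD k (PySem.Dict.mk []) = PySem.Dict.mk [] := by
  apply PySem.Dict.getD_of_not_contains
  simp [PySem.Dict.contains]
  exact fun x hx hxk => hk (hxk ▸ hx)

-- A's inner loop over one solution, acting on a graph-dict
lemma innerA (s : String) (I : List (String × Int)) (hI : (I.map Prod.fst).Nodup) :
    ∀ (W : List String) (g : String → PySem.Dict String Int), W.Nodup →
    I.foldl (fun rm q => rm.modify q.1 (PySem.Dict.mk []) (fun d => d.insert s q.2))
      (PySem.Dict.mk (W.map (fun w => (w, g w))))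
    = PySem.Dict.mk ((PySem.Set.update W (I.map Prod.fst)).map
        (fun w => (w, match I.find? (fun q => q.1 == w) with
                      | some q => (if w ∈ W then g w else PySem.Dict.mk []).insert s q.2
                      | none => g w))) := by
  induction I with
  | nil =>
    intro W g hW
    simp [PySem.Set.update_nil]
  | cons q I2 ih =>
    intro W g hW
    rw [List.map_cons] at hI
    obtain ⟨hq2, hI2⟩ := List.nodup_cons.mp hI
    have hfind2 : I2.find? (fun q' => q'.1 == q.1) = none := by
      rw [List.find?_eq_none]
      intro x hx
      simp only [beq_iff_eq]
      exact fun h => hq2 (h ▸ (List.mem_map.mpr ⟨x, hx, rfl⟩))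
    rw [List.foldl_cons]
    by_cases hq : q.1 ∈ W
    · rw [show (PySem.Dict.mk (W.map (fun w => (w, g w)))).modify q.1 (PySem.Dict.mk [])
            (fun d => d.insert s q.2)
          = PySem.Dict.mk (W.map (fun w => (w, if w = q.1 then (g q.1).insert s q.2 else g w))) by
        rw [PySem.Dict.modify, getD_graph_mem W g q.1 hW hq, insert_graph_mem W g q.1 hq]]
      rw [ih hI2 W _ hW]
      rw [show PySem.Set.update W (List.map Prod.fst (q :: I2))
            = PySem.Set.update W (I2.map Prod.fst) by
        rw [List.map_cons, PySem.Set.update_cons, PySem.Set.add_of_mem hq]]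
      congr 1
      apply List.map_congr_left
      intro w hw
      by_cases hwq : w = q.1
      · subst hwq
        rw [List.find?_cons_of_pos (by simp), hfind2]
        simp [hq]
      · rw [List.find?_cons_of_neg (by simp [Ne.symm hwq])]
        cases hf : I2.find? (fun q' => q'.1 == w) <;> simp [hwq]
    · rw [show (PySem.Dict.mk (W.map (fun w => (w, g w)))).modify q.1 (PySem.Dict.mk [])
            (fun d => d.insert s q.2)
          = PySem.Dict.mk ((W ++ [q.1]).map
              (fun w => (w, if w = q.1 then (PySem.Dict.mk []).insert s q.2 else g w))) by
        rw [PySem.Dict.modify, getD_graph_not_mem W g q.1 hq, insert_graph_not_mem W g q.1 hq]]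
      rw [ih hI2 (W ++ [q.1]) _
        (by simp [List.nodup_append, hW]; exact fun a ha h => hq (h ▸ ha))]
      rw [show PySem.Set.update W (List.map Prod.fst (q :: I2))
            = PySem.Set.update (W ++ [q.1]) (I2.map Prod.fst) by
        rw [List.map_cons, PySem.Set.update_cons, PySem.Set.add_of_not_mem hq]]
      congr 1
      apply List.map_congr_left
      intro w hw
      by_cases hwq : w = q.1
      · subst hwq
        rw [List.find?_cons_of_pos (by simp), hfind2]
        simp [hq]
      · rw [List.find?_cons_of_neg (by simp [Ne.symm hwq])]
        have hmem : w ∈ W ++ [q.1] ↔ w ∈ W := by simp [hwq]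
        cases hf : I2.find? (fun q' => q'.1 == w) <;> simp [hwq, hmem]

lemma insert_append_of_not_contains {ν : Type} (l : List (String × ν)) (k : String) (v : ν)
    (h : k ∉ l.map Prod.fst) :
    (PySem.Dict.mk l).insert k v = PySem.Dict.mk (l ++ [(k, v)]) := by
  have hc : (PySem.Dict.mk l).contains k = false := by
    simp only [PySem.Dict.contains, List.any_eq_false]
    intro x hx
    simpa using fun hxk => h (List.mem_map.mpr ⟨x, hx, hxk⟩)
  simp [PySem.Dict.insert, hc]

lemma A_core (L : List (String × List (String × Int)))
    (hk : (L.map Prod.fst).Nodup) (hin : ∀ p ∈ L, (p.2.map Prod.fst).Nodup) :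
    L.foldl (fun rm p =>
      p.2.foldl (fun rm q => rm.modify q.1 (PySem.Dict.mk []) (fun d => d.insert p.1 q.2)) rm)
      (PySem.Dict.mk [])
    = PySem.Dict.mk ((PySem.Set.ofList (pvAllW L)).map
        (fun w => (w, PySem.Dict.mk (pvRowF L w)))) := by
  induction L using List.reverseRecOn with
  | nil => simp [pvAllW, pvRowF, PySem.Set.ofList]
  | append_singleton L p ih =>
    rw [List.map_append] at hk
    have hs : p.1 ∉ L.map Prod.fst := by
      intro hmem
      exact (List.disjoint_of_nodup_append hk) hmem (by simp)
    have hkL : (L.map Prod.fst).Nodup := (List.nodup_append.mp hk).1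
    have hinL : ∀ x ∈ L, (x.2.map Prod.fst).Nodup := fun x hx => hin x (by simp [hx])
    rw [List.foldl_append, ih hkL hinL, List.foldl_cons, List.foldl_nil]
    rw [show PySem.Dict.mk ((PySem.Set.ofList (pvAllW L)).map
          (fun w => (w, PySem.Dict.mk (pvRowF L w))))
        = PySem.Dict.mk ((PySem.Set.ofList (pvAllW L)).map
          (fun w => (w, (fun w' => PySem.Dict.mk (pvRowF L w')) w))) from rfl]
    rw [innerA p.1 p.2 (hin p (by simp)) _ _ (PySem.Set.nodup_ofList _)]
    rw [show pvAllW (L ++ [p]) = pvAllW L ++ p.2.map Prod.fst by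
      simp [pvAllW]]
    rw [PySem.Set.ofList_append]
    congr 1
    apply List.map_congr_left
    intro w hw
    cases hf : p.2.find? (fun q => q.1 == w) with
    | none =>
      have hrow : pvRowF (L ++ [p]) w = pvRowF L w := by
        simp [pvRowF, List.filterMap_append, hf]
      simp [hrow]
    | some q =>
      have hrow : pvRowF (L ++ [p]) w = pvRowF L w ++ [(p.1, q.2)] := by
        simp [pvRowF, List.filterMap_append, hf]
      by_cases hmem : w ∈ PySem.Set.ofList (pvAllW L)
      · have hni : p.1 ∉ (pvRowF L w).map Prod.fst := fun hc => hs (pvRowF_keys_subset hc)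
        simp only [hmem, if_true, hrow]
        rw [insert_append_of_not_contains _ _ _ hni]
      · have hrw : pvRowF L w = [] :=
          pvRowF_nil_of_not_mem (fun hc => hmem (by rwa [PySem.Set.mem_ofList]))
        simp only [hmem, if_false, hrow, hrw]
        rw [insert_append_of_not_contains _ _ _ (by simp)]

-- B phase 1: the (seen, words) pair stays diagonal and accumulates Set.update
lemma words_inner (ws : List String) :
    ∀ s : List String,
    ws.foldl (fun sw w => if PySem.Set.contains sw.1 w then sw
                          else (PySem.Set.add sw.1 w, sw.2 ++ [w])) (s, s)
    = (PySem.Set.update s ws, PySem.Set.update s ws) := by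
  induction ws with
  | nil => intro s; simp [PySem.Set.update_nil]
  | cons w ws ih =>
    intro s
    rw [List.foldl_cons, PySem.Set.update_cons]
    by_cases hw : w ∈ s
    · rw [if_pos (by simpa [PySem.Set.contains_iff] using hw), PySem.Set.add_of_mem hw]
      exact ih s
    · rw [if_neg (by simpa [PySem.Set.contains_iff] using hw), PySem.Set.add_of_not_mem hw]
      exact ih (s ++ [w])

lemma words_core (L : List (String × List (String × Int))) :
    ∀ s : List String,
    L.foldl (fun sw p =>
      (p.2.map Prod.fst).foldl (fun sw w => if PySem.Set.contains sw.1 w then sw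
                          else (PySem.Set.add sw.1 w, sw.2 ++ [w])) sw) (s, s)
    = (PySem.Set.update s (pvAllW L), PySem.Set.update s (pvAllW L)) := by
  induction L with
  | nil => intro s; simp [pvAllW, PySem.Set.update_nil]
  | cons p L ih =>
    intro s
    rw [List.foldl_cons, words_inner, ih, show pvAllW (p :: L) = p.2.map Prod.fst ++ pvAllW L by
      simp [pvAllW], PySem.Set.update_append]

-- B phase 2: the per-word scan over solutions computes pvRowF
lemma rowP_eq_rowF (L : List (String × List (String × Int)))
    (hk : (L.map Prod.fst).Nodup) (w : String) :
    L.foldl (fun r p => if (PySem.Dict.mk p.2).contains w then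
        r.insert p.1 ((PySem.Dict.mk p.2).getD w 0) else r) (PySem.Dict.mk [])
    = PySem.Dict.mk (pvRowF L w) := by
  induction L using List.reverseRecOn with
  | nil => simp [pvRowF]
  | append_singleton L p ih =>
    rw [List.map_append] at hk
    have hs : p.1 ∉ L.map Prod.fst := by
      intro hmem
      exact (List.disjoint_of_nodup_append hk) hmem (by simp)
    rw [List.foldl_append, ih (List.nodup_append.mp hk).1, List.foldl_cons, List.foldl_nil]
    cases hf : p.2.find? (fun q => q.1 == w) with
    | none =>
      have hc : (PySem.Dict.mk p.2).contains w = false := by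
        simp only [PySem.Dict.contains, List.any_eq_false]
        intro x hx
        have := List.find?_eq_none.mp hf x hx
        simpa using this
      have hrow : pvRowF (L ++ [p]) w = pvRowF L w := by
        simp [pvRowF, List.filterMap_append, hf]
      simp [hc, hrow]
    | some q =>
      have hc : (PySem.Dict.mk p.2).contains w = true := by
        simp only [PySem.Dict.contains, List.any_eq_true]
        have hpq := List.find?_some hf
        exact ⟨q, List.mem_of_find?_eq_some hf, hpq⟩
      have hget : (PySem.Dict.mk p.2).getD w 0 = q.2 := by
        simp [PySem.Dict.getD, PySem.Dict.get?, hf]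
      have hrow : pvRowF (L ++ [p]) w = pvRowF L w ++ [(p.1, q.2)] := by
        simp [pvRowF, List.filterMap_append, hf]
      rw [hrow]
      simp only [hc, if_true, hget]
      exact insert_append_of_not_contains _ _ _
        (fun hck => hs (pvRowF_keys_subset hck))

-- the two ports, reduced to the same canonical transpose
lemma A_eq_canon (km : List (String × List (String × Int))) (h : Pre_reorder_keywords km) :
    reorder_keywords km
    = ((PySem.Set.ofList (pvAllW km)).map
        (fun w => (w, PySem.Dict.mk (pvRowF km w)))).map (fun p => (p.1, p.2.items)) := by
  obtain ⟨hk, hin⟩ := h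
  show (PySem.Dict.items _).map _ = _
  congr 1
  rw [foldl_keys_getD km hk
    (fun rm sol inner => inner.keys.foldl (fun rm w =>
        if rm.keys.contains w then
          rm.modify w (PySem.Dict.mk []) (fun d => d.insert sol (inner.getD w 0))
        else
          (rm.insert w (PySem.Dict.mk [])).modify w (PySem.Dict.mk [])
            (fun d => d.insert sol (inner.getD w 0))) rm) (PySem.Dict.mk [])]
  have h1 : ∀ (rm : PySem.Dict String (PySem.Dict String Int))
      (p : String × List (String × Int)), p ∈ km →
      (PySem.Dict.mk p.2).keys.foldl (fun rm w =>
        if rm.keys.contains w then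
          rm.modify w (PySem.Dict.mk []) (fun d => d.insert p.1 ((PySem.Dict.mk p.2).getD w 0))
        else
          (rm.insert w (PySem.Dict.mk [])).modify w (PySem.Dict.mk [])
            (fun d => d.insert p.1 ((PySem.Dict.mk p.2).getD w 0))) rm
      = p.2.foldl (fun rm q =>
          rm.modify q.1 (PySem.Dict.mk []) (fun d => d.insert p.1 q.2)) rm := by
    intro rm p hp
    rw [foldl_inner_keys p.2 (hin p hp)
      (fun rm w v => if rm.keys.contains w then
          rm.modify w (PySem.Dict.mk []) (fun d => d.insert p.1 v)
        else
          (rm.insert w (PySem.Dict.mk [])).modify w (PySem.Dict.mk [])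
            (fun d => d.insert p.1 v)) rm]
    exact PySem.List.foldl_congr_mem _ _ _ _
      (fun rm (q : String × Int) _ => stepA_collapse rm q.1 p.1 q.2)
  rw [PySem.List.foldl_congr_mem km
    (f := fun rm (p : String × List (String × Int)) =>
      (PySem.Dict.mk p.2).keys.foldl (fun rm w =>
        if rm.keys.contains w then
          rm.modify w (PySem.Dict.mk []) (fun d => d.insert p.1 ((PySem.Dict.mk p.2).getD w 0))
        else
          (rm.insert w (PySem.Dict.mk [])).modify w (PySem.Dict.mk [])
            (fun d => d.insert p.1 ((PySem.Dict.mk p.2).getD w 0))) rm)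
    (g := fun rm (p : String × List (String × Int)) =>
      p.2.foldl (fun rm q =>
        rm.modify q.1 (PySem.Dict.mk []) (fun d => d.insert p.1 q.2)) rm)
    (PySem.Dict.mk []) h1]
  rw [A_core km hk hin]

lemma B_eq_canon (km : List (String × List (String × Int))) (h : Pre_reorder_keywords km) :
    reorder_keywords_alt km
    = ((PySem.Set.ofList (pvAllW km)).map
        (fun w => (w, PySem.Dict.mk (pvRowF km w)))).map (fun p => (p.1, p.2.items)) := by
  obtain ⟨hk, hin⟩ := h
  show (PySem.Dict.items _).map _ = _
  congr 1
  rw [foldl_keys_getD km hk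
    (fun sw sol inner => inner.keys.foldl (fun sw w =>
        if PySem.Set.contains sw.1 w then sw
        else (PySem.Set.add sw.1 w, sw.2 ++ [w])) sw) (PySem.Set.empty, [])]
  have h1 : ∀ (sw : PySem.Set String × List String)
      (p : String × List (String × Int)), p ∈ km →
      (PySem.Dict.mk p.2).keys.foldl (fun sw w =>
        if PySem.Set.contains sw.1 w then sw
        else (PySem.Set.add sw.1 w, sw.2 ++ [w])) sw
      = (p.2.map Prod.fst).foldl (fun sw w =>
        if PySem.Set.contains sw.1 w then sw
        else (PySem.Set.add sw.1 w, sw.2 ++ [w])) sw := by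
    intro sw p hp
    rfl
  rw [PySem.List.foldl_congr_mem km
    (f := fun (sw : PySem.Set String × List String) (p : String × List (String × Int)) =>
      (PySem.Dict.mk p.2).keys.foldl (fun sw w =>
        if PySem.Set.contains sw.1 w then sw
        else (PySem.Set.add sw.1 w, sw.2 ++ [w])) sw)
    (g := fun (sw : PySem.Set String × List String) (p : String × List (String × Int)) =>
      (p.2.map Prod.fst).foldl (fun sw w =>
        if PySem.Set.contains sw.1 w then sw
        else (PySem.Set.add sw.1 w, sw.2 ++ [w])) sw)
    (PySem.Set.empty, []) h1]
  rw [show (PySem.Set.empty, ([] : List String))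
      = (([] : List String), ([] : List String)) from rfl]
  rw [words_core km []]
  rw [show PySem.Set.update [] (pvAllW km) = PySem.Set.ofList (pvAllW km) from
    PySem.Set.update_nil_left _]
  have hrow : (fun (d : PySem.Dict String (PySem.Dict String Int)) (w : String) =>
      d.insert w
        ((PySem.Dict.mk (km.map (fun p => (p.1, PySem.Dict.mk p.2)))).keys.foldl
          (fun r sol_id =>
            if ((PySem.Dict.mk (km.map (fun p => (p.1, PySem.Dict.mk p.2)))).getD sol_id
                  (PySem.Dict.mk [])).contains w then
              r.insert sol_id
                (((PySem.Dict.mk (km.map (fun p => (p.1, PySem.Dict.mk p.2)))).getD sol_id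
                  (PySem.Dict.mk [])).getD w 0)
            else r) (PySem.Dict.mk [])))
      = (fun d w => d.insert w (PySem.Dict.mk (pvRowF km w))) := by
    funext d w
    rw [foldl_keys_getD km hk
      (fun r sol inner => if inner.contains w then r.insert sol (inner.getD w 0) else r)
      (PySem.Dict.mk [])]
    rw [rowP_eq_rowF km hk w]
  rw [hrow]
  rw [PySem.Dict.items_foldl_insert_fresh (PySem.Set.ofList (pvAllW km))
    (fun w : String => w) (fun w => PySem.Dict.mk (pvRowF km w)) (PySem.Dict.mk [])
    (by intro a ha; simp [PySem.Dict.contains])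
    (by simp [PySem.Set.nodup_ofList])]
  simp

-- ===== VERDICT (by name: the statement is the Claim_ definition above) =====
theorem reorder_keywords_spec : Claim_equal_reorder_keywords := by
  intro km hdom hpre
  show reorder_keywords km = reorder_keywords_alt km
  rw [A_eq_canon km hpre, B_eq_canon km hpre]
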